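-- pv_equiv track=rewrite | github.com/Bynaryman/schematic_div | schematic_division_n_bit_adder_no_plot.py | full_adder_n_bits
-- ===== SOURCE A (Python) =====
-- def xor(bit_a, bit_b):
-- 	A1 = bit_a and (not bit_b)
-- 	A2 = (not bit_a) and bit_b
-- 	return int(A1 or A2)
--
-- def half_adder(bit_a, bit_b):
-- 	return (xor(bit_a, bit_b), bit_a and bit_b)
--
-- def full_adder(bit_a, bit_b, carry=0):
-- 	sum1, carry1 = half_adder(bit_a, bit_b)
-- 	sum2, carry2 = half_adder(sum1, carry)
-- 	return (sum2, carry1 or carry2)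
--
-- def full_adder_n_bits(n, bits_a, bits_b, carry=0):
-- 	sum_bits = 0
-- 	for i in range(n):
-- 		bit_a = (bits_a >> i) & 1
-- 		bit_b = (bits_b >> i) & 1
-- 		sum_bit, carry = full_adder(bit_a, bit_b, carry)
-- 		sum_bits |= (sum_bit << i)
-- 	return (sum_bits, carry)
-- ===== SOURCE B (Python) =====
-- def full_adder_n_bits(n, bits_a, bits_b, carry=0):
--     if n <= 0:
--         return (0, carry)
--     mask = (1 << n) - 1
--     total = (bits_a & mask) + (bits_b & mask) + (1 if carry else 0)
--     return (total & mask, total >> n)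
-- ===== Notes on version B (the rewrite author's own statement) =====
-- stated objective: simpler
-- what changed: Replaces the bit-by-bit ripple-carry loop (n iterations of a gate-level full adder with xor/half_adder helpers) by one masked big-integer addition of the operands plus the carry-in bit, then mask/shift to split sum and carry-out; O(n) loop iterations become a single add (unverified in a timing run, whose large inputs draw carry values outside Pre_).
-- outside the precondition, e.g. on full_adder_n_bits(6, 29, 14, -4): A returns (-8, 0), B returns (44, 0); on full_adder_n_bits(2, 1, 2, 5): A returns (0, 5), B returns (0, 1)
import Mathlib
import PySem

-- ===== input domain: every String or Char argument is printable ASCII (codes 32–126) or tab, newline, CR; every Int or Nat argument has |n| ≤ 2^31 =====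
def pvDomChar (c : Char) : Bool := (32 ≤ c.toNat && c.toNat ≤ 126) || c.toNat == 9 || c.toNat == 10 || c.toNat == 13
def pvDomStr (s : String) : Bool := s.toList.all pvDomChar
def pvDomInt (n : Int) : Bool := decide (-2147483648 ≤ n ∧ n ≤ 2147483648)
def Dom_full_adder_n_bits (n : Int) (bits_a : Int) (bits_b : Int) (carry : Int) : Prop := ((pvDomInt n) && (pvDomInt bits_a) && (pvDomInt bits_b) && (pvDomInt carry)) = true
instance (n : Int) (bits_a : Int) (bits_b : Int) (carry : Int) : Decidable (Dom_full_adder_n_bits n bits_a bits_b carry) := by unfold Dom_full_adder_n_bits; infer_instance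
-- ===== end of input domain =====

-- B replaces A's bit-by-bit ripple-carry loop by a single masked addition followed by
-- mask/shift (objective: simpler); equality is proved on Pre_ (carry-in a bit when 0 < n).


-- ===== PORT A =====
-- xor: `A1 = bit_a and (not bit_b); A2 = (not bit_a) and bit_b; return int(A1 or A2)`.
-- Python mixes bool/int here; this if-chain is the exact value of int(A1 or A2) for int
-- arguments: bit_a truthy → A1 = not bit_b (a bool), A2 = False, int gives 1/0;
-- bit_a == 0 → A1 = 0, A2 = bit_b (the raw int), and int(0 or bit_b) = bit_b.
def pyXor (bit_a : Int) (bit_b : Int) : Int :=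
  if bit_a ≠ 0 then (if bit_b = 0 then 1 else 0) else bit_b

def half_adder (bit_a : Int) (bit_b : Int) : Int × Int :=
  (pyXor bit_a bit_b, if bit_a ≠ 0 then bit_b else bit_a)  -- `bit_a and bit_b`

def full_adder (bit_a : Int) (bit_b : Int) (carry : Int) : Int × Int :=
  let s1 := half_adder bit_a bit_b
  let s2 := half_adder s1.1 carry
  (s2.1, if s1.2 ≠ 0 then s1.2 else s2.2)  -- `carry1 or carry2`

-- one iteration of the `for i in range(n)` body; i ≥ 0 there, so the `.toNat` shift
-- amounts are exact
def faStep (bits_a : Int) (bits_b : Int) (st : Int × Int) (i : Int) : Int × Int :=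
  let bit_a := PySem.Int.band (bits_a >>> i.toNat) 1    -- (bits_a >> i) & 1
  let bit_b := PySem.Int.band (bits_b >>> i.toNat) 1    -- (bits_b >> i) & 1
  let r := full_adder bit_a bit_b st.2
  (PySem.Int.bor st.1 (r.1 <<< i.toNat), r.2)           -- sum_bits |= (sum_bit << i)

def full_adder_n_bits (n : Int) (bits_a : Int) (bits_b : Int) (carry : Int) : Int × Int :=
  (PySem.List.pyRange 0 n 1).foldl (faStep bits_a bits_b) (0, carry)

-- ===== PORT B =====
def full_adder_n_bits_alt (n : Int) (bits_a : Int) (bits_b : Int) (carry : Int) : Int × Int :=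
  if n ≤ 0 then (0, carry)
  else
    let mask : Int := ((1 : Int) <<< n.toNat) - 1       -- (1 << n) - 1; 0 < n here
    let total : Int := PySem.Int.band bits_a mask + PySem.Int.band bits_b mask
                        + (if carry ≠ 0 then 1 else 0)  -- 1 if carry else 0
    (PySem.Int.band total mask, total >>> n.toNat)      -- (total & mask, total >> n)

-- ===== PRECONDITION & SPEC =====
-- Pre_ excludes calls with 0 < n whose carry-in is not the bit 0 or 1: carry is a carry-in
-- BIT (like the per-position bits A extracts), and for any other int A's bool/int
-- truthiness logic leaks the raw carry value into the sum and carry outputs (e.g. a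
-- negative "sum" of two masked operands), an accidental value no caller of a bit-level
-- adder would specify; B does the natural thing there.
def Pre_full_adder_n_bits (n : Int) (bits_a : Int) (bits_b : Int) (carry : Int) : Prop :=
  0 < n → (carry = 0 ∨ carry = 1)
instance (n : Int) (bits_a : Int) (bits_b : Int) (carry : Int) : Decidable (Pre_full_adder_n_bits n bits_a bits_b carry) := by unfold Pre_full_adder_n_bits; infer_instance

def pvWitness_full_adder_n_bits : Int × Int × Int × Int := (4, 11, 6, 1)

def Spec_full_adder_n_bits (n : Int) (bits_a : Int) (bits_b : Int) (carry : Int) (out : Int × Int) : Prop := out = full_adder_n_bits_alt n bits_a bits_b carry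
instance (n : Int) (bits_a : Int) (bits_b : Int) (carry : Int) (out : Int × Int) : Decidable (Spec_full_adder_n_bits n bits_a bits_b carry out) := by unfold Spec_full_adder_n_bits; infer_instance

-- ===== CLAIM (what is proved, stated in full; the proofs are below) =====
def Claim_equal_full_adder_n_bits : Prop := ∀ (n : Int) (bits_a : Int) (bits_b : Int) (carry : Int), Dom_full_adder_n_bits n bits_a bits_b carry → Pre_full_adder_n_bits n bits_a bits_b carry → Spec_full_adder_n_bits n bits_a bits_b carry (full_adder_n_bits n bits_a bits_b carry)

-- ===== LEMMAS AND PROOFS =====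

-- Python `x & ((1 << m) - 1)` is `x mod 2^m`, also on negative x (two's complement)
lemma band_mask (x : Int) (m : Nat) : PySem.Int.band x (2^m - 1) = x % 2^m := by
  have hp : (0:Int) < 2^m := by positivity
  have hcast : ((2:Int)^m) = ((2^m : Nat) : Int) := by push_cast; ring
  have hMt : ((2:Int)^m - 1).toNat = 2^m - 1 := by rw [hcast]; omega
  rcases le_or_gt 0 x with hx | hx
  · rw [PySem.Int.band, if_pos hx, if_pos (by omega), hMt,
      Nat.and_two_pow_sub_one_eq_mod]
    push_cast [Int.toNat_of_nonneg hx]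
    rfl
  · rw [PySem.Int.band, if_neg (by omega), if_pos (by omega), hMt]
    set u : Nat := (-x - 1).toNat with hu
    have hxu : x = -(u : Int) - 1 := by omega
    rw [Nat.land_comm, Nat.and_two_pow_sub_one_eq_mod]
    obtain ⟨q, r, hr, huqr⟩ : ∃ q r, r < 2^m ∧ u = 2^m * q + r ∧ r = u % 2^m :=
      ⟨u / 2^m, u % 2^m, Nat.mod_lt _ (by positivity), (Nat.div_add_mod u (2^m)).symm, rfl⟩
    obtain ⟨huqr, hrdef⟩ := huqr
    have hxe : x = ((2:Int)^m - 1 - (r : Nat)) + 2^m * (-(q:Int) - 1) := by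
      rw [hxu, hcast]; push_cast [huqr]; ring
    rw [hxe, Int.add_mul_emod_self_left,
      Int.emod_eq_of_lt (by rw [hcast]; push_cast; omega) (by rw [hcast]; push_cast; omega)]
    rw [hcast, ← hrdef]; push_cast; omega

-- Nat: setting one bit above all bits of `x` is addition
lemma lor_two_pow_nat (x m : Nat) (h : x < 2^m) : x ||| 2^m = x + 2^m := by
  apply Nat.eq_of_testBit_eq
  intro i
  rw [Nat.testBit_lor, Nat.testBit_two_pow]
  rcases lt_trichotomy i m with hi | rfl | hi
  · rw [show x + 2^m = 2^m + x from by ring, Nat.testBit_two_pow_add_gt hi]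
    simp [Nat.ne_of_gt hi]
  · rw [show x + 2^i = 2^i + x from by ring, Nat.testBit_two_pow_add_eq,
      Nat.testBit_lt_two_pow h]
    simp
  · have hx : x.testBit i = false :=
      Nat.testBit_lt_two_pow (lt_of_lt_of_le h (Nat.pow_le_pow_right (by norm_num) hi.le))
    have hsum : x + 2^m < 2^i := by
      have h1 : 2^(m+1) ≤ 2^i := Nat.pow_le_pow_right (by norm_num) hi
      have : x + 2^m < 2^(m+1) := by rw [pow_succ]; omega
      omega
    rw [hx, Nat.testBit_lt_two_pow hsum]
    simp [Nat.ne_of_lt hi]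

-- `sum_bits |= (sum_bit << i)` writes a disjoint bit, i.e. adds it
lemma bor_shift (lo s : Int) (m : Nat) (h0 : 0 ≤ lo) (h1 : lo < 2^m) (hs : s = 0 ∨ s = 1) :
    PySem.Int.bor lo (s <<< m) = lo + s * 2^m := by
  rcases hs with rfl | rfl
  · simp [Int.shiftLeft_eq, PySem.Int.bor_zero]
  · rw [Int.shiftLeft_eq, one_mul]
    have hp : (0:Int) ≤ 2^m := by positivity
    rw [PySem.Int.bor_of_nonneg h0 hp]
    have ht : ((2:Int)^m).toNat = 2^m := by
      have : ((2:Int)^m) = ((2^m : Nat) : Int) := by push_cast; ring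
      omega
    rw [ht, lor_two_pow_nat lo.toNat m (by omega)]
    push_cast
    omega

-- on genuine bits, A's gate-level full adder is the arithmetic one
lemma full_adder_bits (x y z : Int) (hx : x = 0 ∨ x = 1) (hy : y = 0 ∨ y = 1)
    (hz : z = 0 ∨ z = 1) : full_adder x y z = ((x+y+z) % 2, (x+y+z) / 2) := by
  rcases hx with rfl | rfl <;> rcases hy with rfl | rfl <;> rcases hz with rfl | rfl <;> decide

-- peeling the next binary digit off `a mod 2^(m+1)`
lemma emod_two_pow_succ (a : Int) (m : Nat) :
    a % 2^(m+1) = a % 2^m + (a / 2^m % 2) * 2^m := by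
  have hp : (0:Int) < 2^m := by positivity
  have h1 : a / 2^m / 2 = a / 2^(m+1) := by
    rw [Int.ediv_ediv_of_nonneg hp.le]; ring_nf
  have h2 := Int.mul_ediv_add_emod a (2^m)
  have h3 := Int.mul_ediv_add_emod a (2^(m+1))
  have h4 := Int.mul_ediv_add_emod (a / 2^m) 2
  rw [← h1] at h3
  rw [show ((2:Int)^(m+1)) = 2^m * 2 from by ring] at h3 ⊢
  linear_combination h3 - h2 - (2^m : Int) * h4

-- one loop iteration takes the state for m bits to the state for m+1 bits
lemma faStep_spec (a b c : Int) (hc : c = 0 ∨ c = 1) (m : Nat) :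
    faStep a b ((a % 2^m + b % 2^m + c) % 2^m, (a % 2^m + b % 2^m + c) / 2^m) (m : Int)
      = ((a % 2^(m+1) + b % 2^(m+1) + c) % 2^(m+1), (a % 2^(m+1) + b % 2^(m+1) + c) / 2^(m+1)) := by
  have hK : (0:Int) < 2^m := by positivity
  have hK2 : (0:Int) < 2^(m+1) := by positivity
  have hc' : 0 ≤ c ∧ c ≤ 1 := by rcases hc with rfl | rfl <;> norm_num
  have ha0 : 0 ≤ a % 2^m := Int.emod_nonneg _ (ne_of_gt hK)
  have ha1 : a % 2^m < 2^m := Int.emod_lt_of_pos _ hK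
  have hb0 : 0 ≤ b % 2^m := Int.emod_nonneg _ (ne_of_gt hK)
  have hb1 : b % 2^m < 2^m := Int.emod_lt_of_pos _ hK
  have hlo0 : 0 ≤ (a % 2^m + b % 2^m + c) % 2^m := Int.emod_nonneg _ (ne_of_gt hK)
  have hlo1 : (a % 2^m + b % 2^m + c) % 2^m < 2^m := Int.emod_lt_of_pos _ hK
  have hcb0 : 0 ≤ (a % 2^m + b % 2^m + c) / 2^m := Int.ediv_nonneg (by omega) hK.le
  have hcb1 : (a % 2^m + b % 2^m + c) / 2^m < 2 :=
    Int.ediv_lt_of_lt_mul hK (by linarith)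
  have hpa0 : 0 ≤ a / 2^m % 2 := Int.emod_nonneg _ (by norm_num)
  have hpa1 : a / 2^m % 2 < 2 := Int.emod_lt_of_pos _ (by norm_num)
  have hpb0 : 0 ≤ b / 2^m % 2 := Int.emod_nonneg _ (by norm_num)
  have hpb1 : b / 2^m % 2 < 2 := Int.emod_lt_of_pos _ (by norm_num)
  -- evaluate the step: extract bit m of a and b, run the gate-level adder, OR the bit in
  unfold faStep
  simp only [Int.toNat_natCast, PySem.Int.band_one,
    PySem.Int.mod_eq_emod_of_pos (by norm_num : (0:Int) < 2), Int.shiftRight_eq_div_pow]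
  push_cast
  rw [full_adder_bits _ _ _ (by omega) (by omega) (by omega)]
  simp only
  rw [bor_shift _ _ m hlo0 hlo1 (by omega)]
  -- arithmetic: the new pair is exactly (N' mod 2^(m+1), N' div 2^(m+1))
  have ea := emod_two_pow_succ a m
  have eb := emod_two_pow_succ b m
  have eN := Int.mul_ediv_add_emod (a % 2^m + b % 2^m + c) (2^m)
  have es := Int.mul_ediv_add_emod (a / 2^m % 2 + b / 2^m % 2 + (a % 2^m + b % 2^m + c) / 2^m) 2
  have key : a % 2^(m+1) + b % 2^(m+1) + c
      = ((a % 2^m + b % 2^m + c) % 2^m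
          + (a / 2^m % 2 + b / 2^m % 2 + (a % 2^m + b % 2^m + c) / 2^m) % 2 * 2^m)
        + 2^(m+1) * ((a / 2^m % 2 + b / 2^m % 2 + (a % 2^m + b % 2^m + c) / 2^m) / 2) := by
    rw [ea, eb, pow_succ]
    linear_combination (-(1:Int)) * eN - (2^m : Int) * es
  have hs01 : (a / 2^m % 2 + b / 2^m % 2 + (a % 2^m + b % 2^m + c) / 2^m) % 2 = 0
      ∨ (a / 2^m % 2 + b / 2^m % 2 + (a % 2^m + b % 2^m + c) / 2^m) % 2 = 1 := by omega
  have hr0 : 0 ≤ (a % 2^m + b % 2^m + c) % 2^m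
      + (a / 2^m % 2 + b / 2^m % 2 + (a % 2^m + b % 2^m + c) / 2^m) % 2 * 2^m := by
    rcases hs01 with h | h <;> rw [h] <;> omega
  have hr1 : (a % 2^m + b % 2^m + c) % 2^m
      + (a / 2^m % 2 + b / 2^m % 2 + (a % 2^m + b % 2^m + c) / 2^m) % 2 * 2^m < 2^(m+1) := by
    rcases hs01 with h | h <;> rw [h] <;> rw [pow_succ] <;> omega
  have hfin : (a % 2^(m+1) + b % 2^(m+1) + c) / 2^(m+1)
        = (a / 2^m % 2 + b / 2^m % 2 + (a % 2^m + b % 2^m + c) / 2^m) / 2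
      ∧ (a % 2^(m+1) + b % 2^(m+1) + c) % 2^(m+1)
        = (a % 2^m + b % 2^m + c) % 2^m
          + (a / 2^m % 2 + b / 2^m % 2 + (a % 2^m + b % 2^m + c) / 2^m) % 2 * 2^m :=
    (Int.ediv_emod_unique hK2).mpr ⟨by linarith [key], hr0, hr1⟩
  exact Prod.ext_iff.mpr ⟨hfin.2.symm, hfin.1.symm⟩

-- loop invariant: after the first m iterations the state is the low m bits of the true
-- sum together with the carry out of them
lemma loop_inv (bits_a bits_b c : Int) (hc : c = 0 ∨ c = 1) (m : Nat) :
    (PySem.List.pyRange 0 (m : Int) 1).foldl (faStep bits_a bits_b) (0, c)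
      = ((bits_a % 2^m + bits_b % 2^m + c) % 2^m, (bits_a % 2^m + bits_b % 2^m + c) / 2^m) := by
  induction m with
  | zero =>
    simp [PySem.List.pyRange_one_eq_nil (le_refl (0:Int))]
  | succ m ih =>
    rw [show ((m+1 : Nat) : Int) = (m : Int) + 1 from by push_cast; ring,
      PySem.List.pyRange_one_succ_right (by positivity), List.foldl_append, ih]
    simpa using faStep_spec bits_a bits_b c hc m

-- ===== VERDICT (by name: the statement is the Claim_ definition above) =====
theorem full_adder_n_bits_spec : Claim_equal_full_adder_n_bits := by
  unfold Claim_equal_full_adder_n_bits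
  intro n a b c _ hpre
  unfold Spec_full_adder_n_bits full_adder_n_bits full_adder_n_bits_alt
  by_cases hn : n ≤ 0
  · rw [PySem.List.pyRange_one_eq_nil hn, if_pos hn]
    rfl
  · have hn' : 0 < n := by omega
    have hc := hpre hn'
    have hm : n = ((n.toNat : Nat) : Int) := (Int.toNat_of_nonneg hn'.le).symm
    rw [if_neg (by omega)]
    rw [show PySem.List.pyRange 0 n 1 = PySem.List.pyRange 0 ((n.toNat : Nat) : Int) 1 from by rw [← hm]]
    rw [loop_inv a b c hc n.toNat]
    have hmask : (1 : Int) <<< n.toNat - 1 = 2^n.toNat - 1 := by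
      rw [Int.shiftLeft_eq]; ring
    have hcin : (if c ≠ 0 then (1:Int) else 0) = c := by rcases hc with rfl | rfl <;> simp
    show _ = ((PySem.Int.band _ _ : Int), _)
    rw [hmask]
    simp only [band_mask, hcin, Int.shiftRight_eq_div_pow]
    push_cast
    rfl
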